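-- pv_equiv track=rewrite | github.com/ayoelutilo/ble-forensics-media-reconstructor | src/ble_forensics_media_reconstructor/assembler.py | _compute_gap_map
-- ===== SOURCE A (Python) =====
-- def _compute_gap_map(coverage: list[bool]) -> list[tuple[int, int]]:
--     gap_map: list[tuple[int, int]] = []
--     gap_start: int | None = None
--
--     for index, is_covered in enumerate(coverage):
--         if is_covered:
--             if gap_start is not None:
--                 gap_map.append((gap_start, index))
--                 gap_start = None
--             continue
--
--         if gap_start is None:
--             gap_start = index
--
--     if gap_start is not None:
--         gap_map.append((gap_start, len(coverage)))
--
--     return gap_map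
-- ===== SOURCE B (Python) =====
-- def _compute_gap_map(coverage: list[bool]) -> list[tuple[int, int]]:
--     n = len(coverage)
--     starts = [i for i in range(n)
--               if not coverage[i] and (i == 0 or coverage[i - 1])]
--     ends = [i + 1 for i in range(n)
--             if not coverage[i] and (i == n - 1 or coverage[i + 1])]
--     return list(zip(starts, ends))
-- ===== Notes on version B (the rewrite author's own statement) =====
-- stated objective: alternative
-- what changed: Replaces A's single-scan gap_start state machine by boundary detection: two independent comprehensions find gap starts (False with covered/absent predecessor) and gap ends (False with covered/absent successor), then zip pairs them into intervals.
import Mathlib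
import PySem

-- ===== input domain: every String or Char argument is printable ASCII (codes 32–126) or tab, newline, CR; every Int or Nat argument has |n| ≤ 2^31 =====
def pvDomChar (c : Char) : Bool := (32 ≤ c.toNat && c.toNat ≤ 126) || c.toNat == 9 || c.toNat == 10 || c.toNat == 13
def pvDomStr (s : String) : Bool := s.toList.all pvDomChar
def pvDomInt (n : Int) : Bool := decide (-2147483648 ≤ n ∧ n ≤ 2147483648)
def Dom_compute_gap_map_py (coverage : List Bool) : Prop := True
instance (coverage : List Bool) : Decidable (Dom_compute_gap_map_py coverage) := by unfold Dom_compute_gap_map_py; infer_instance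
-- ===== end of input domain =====

-- B replaces A's gap_start state machine by boundary detection: find all gap starts and all
-- gap ends by neighbour comparison, then zip them; same O(n) cost, a different decomposition.

-- ===== PORT A =====
-- the body of A's for-loop over enumerate(coverage), acting on the state (gap_map, gap_start)
def stepA (s : List (Int × Int) × Option Int) (p : Int × Bool) : List (Int × Int) × Option Int :=
  if p.2 then
    match s.2 with
    | some g => (s.1 ++ [(g, p.1)], none)
    | none => s
  else
    match s.2 with
    | none => (s.1, some p.1)
    | some _ => s

def compute_gap_map_py (coverage : List Bool) : List (Int × Int) :=
  let st := (PySem.List.enumerate coverage).foldl stepA ([], none)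
  match st.2 with
  | some g => st.1 ++ [(g, (coverage.length : Int))]
  | none => st.1

-- ===== PORT B =====
-- the two comprehensions over range(n) (n = len(coverage) inlined); coverage[i] is always in
-- range, and the neighbour lookups are short-circuited exactly as in Python, so the getD
-- default is never observed; list(zip(starts, ends)) is List.zip.
def compute_gap_map_py_alt (coverage : List Bool) : List (Int × Int) :=
  (((List.range coverage.length).filter
      (fun i => !(coverage.getD i true) && (decide (i = 0) || coverage.getD (i - 1) true))).map
      (fun i : ℕ => (i : Int))).zip
  (((List.range coverage.length).filter
      (fun i => !(coverage.getD i true) &&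
        (decide (i = coverage.length - 1) || coverage.getD (i + 1) true))).map
      (fun i : ℕ => (i : Int) + 1))

-- ===== PRECONDITION & SPEC =====
def Spec_compute_gap_map_py (coverage : List Bool) (out : List (Int × Int)) : Prop := out = compute_gap_map_py_alt coverage
instance (coverage : List Bool) (out : List (Int × Int)) : Decidable (Spec_compute_gap_map_py coverage out) := by unfold Spec_compute_gap_map_py; infer_instance

-- ===== CLAIM (what is proved, stated in full; the proofs are below) =====
def Claim_equal_compute_gap_map_py : Prop := ∀ (coverage : List Bool), Dom_compute_gap_map_py coverage → Spec_compute_gap_map_py coverage (compute_gap_map_py coverage)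

-- ===== LEMMAS AND PROOFS =====

-- canonical one-element-at-a-time recursion A's fold is reduced to
def run : List Bool → Int → Option Int → List (Int × Int)
  | [], pos, some g => [(g, pos)]
  | [], _, none => []
  | true :: rest, pos, some g => (g, pos) :: run rest (pos + 1) none
  | true :: rest, pos, none => run rest (pos + 1) none
  | false :: rest, pos, some g => run rest (pos + 1) (some g)
  | false :: rest, pos, none => run rest (pos + 1) (some pos)

-- gap starts of xs from position p, given the covered-status `prev` of the element before xs
def gapStarts : List Bool → Bool → Int → List Int
  | [], _, _ => []
  | b :: r, prev, p => (if !b && prev then [p] else []) ++ gapStarts r b (p + 1)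

-- gap ends of xs from position p (an end looks one element ahead)
def gapEnds : List Bool → Int → List Int
  | [], _ => []
  | b :: r, p => (if !b && (r.head?.getD true) then [p + 1] else []) ++ gapEnds r (p + 1)

theorem lemA : ∀ (xs : List Bool) (i : Int) (acc : List (Int × Int)) (gs : Option Int),
    (let st := (PySem.List.enumerate xs i).foldl stepA (acc, gs);
     match st.2 with
     | some g => st.1 ++ [(g, i + (xs.length : Int))]
     | none => st.1)
    = acc ++ run xs i gs := by
  intro xs
  induction xs with
  | nil =>
    intro i acc gs
    cases gs <;> simp [PySem.List.enumerate_nil, run]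
  | cons x rest ih =>
    intro i acc gs
    have hlen : i + (((x :: rest).length : Nat) : Int) = (i + 1) + (rest.length : Int) := by
      simp; ring
    simp only [PySem.List.enumerate_cons, List.foldl_cons, hlen]
    cases x with
    | false =>
      cases gs with
      | none =>
        have hs : stepA (acc, none) (i, false) = (acc, some i) := rfl
        rw [hs, ih (i + 1) acc (some i)]
        simp [run]
      | some g =>
        have hs : stepA (acc, some g) (i, false) = (acc, some g) := rfl
        rw [hs, ih (i + 1) acc (some g)]
        simp [run]
    | true =>
      cases gs with
      | none =>
        have hs : stepA (acc, none) (i, true) = (acc, none) := rfl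
        rw [hs, ih (i + 1) acc none]
        simp [run]
      | some g =>
        have hs : stepA (acc, some g) (i, true) = (acc ++ [(g, i)], none) := rfl
        rw [hs, ih (i + 1) (acc ++ [(g, i)]) none]
        simp [run]

-- run = zip of boundary lists (closed gap-state and open gap-state forms, proved together)
theorem run_zip : ∀ (xs : List Bool) (p : Int),
    run xs p none = (gapStarts xs true p).zip (gapEnds xs p)
    ∧ ∀ g : Int, run xs p (some g)
        = ((g :: gapStarts xs false p).zip
            (if xs.head?.getD true then p :: gapEnds xs p else gapEnds xs p)) := by
  intro xs
  induction xs with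
  | nil =>
    intro p
    refine ⟨by simp [run, gapStarts, gapEnds], fun g => by simp [run, gapStarts, gapEnds]⟩
  | cons b r ih =>
    intro p
    obtain ⟨ihn, iho⟩ := ih (p + 1)
    cases b with
    | true =>
      constructor
      · simpa [run, gapStarts, gapEnds] using ihn
      · intro g
        simp [run, gapStarts, gapEnds, ihn]
    | false =>
      constructor
      · have h := iho p
        simp only [run, gapStarts, gapEnds, h]
        cases r.head?.getD true <;> simp
      · intro g
        have h := iho g
        simp only [run, gapStarts, gapEnds, h]
        cases r.head?.getD true <;> simp

-- the starts comprehension computes gapStarts (generalized over prev and offset p)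
theorem starts_filter : ∀ (xs : List Bool) (prev : Bool) (p : Int),
    (((List.range xs.length).filter
        (fun i => !(xs.getD i true) &&
          (decide (i = 0) && prev || decide (i ≠ 0) && xs.getD (i - 1) true))).map
        (fun i : ℕ => p + (i : Int)))
    = gapStarts xs prev p := by
  intro xs
  induction xs with
  | nil => intro prev p; simp [gapStarts]
  | cons b r ih =>
    intro prev p
    rw [List.length_cons, List.range_succ_eq_map, List.filter_cons]
    have hpred : ((fun i => !((b :: r).getD i true) &&
          (decide (i = 0) && prev || decide (i ≠ 0) && (b :: r).getD (i - 1) true)) ∘ Nat.succ)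
        = (fun j => !(r.getD j true) &&
          (decide (j = 0) && b || decide (j ≠ 0) && r.getD (j - 1) true)) := by
      funext j
      cases j with
      | zero => simp
      | succ s => simp
    have hmap : ((fun i : ℕ => p + (i : Int)) ∘ Nat.succ)
        = (fun j : ℕ => (p + 1) + (j : Int)) := by
      funext j; simp [Function.comp, Nat.succ_eq_add_one]; ring
    have hrest : (List.filter (fun i => !((b :: r).getD i true) &&
          (decide (i = 0) && prev || decide (i ≠ 0) && (b :: r).getD (i - 1) true))
          (List.map Nat.succ (List.range r.length))).map (fun i : ℕ => p + (i : Int))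
        = gapStarts r b (p + 1) := by
      rw [List.filter_map, List.map_map, hpred, hmap, ih b (p + 1)]
    have hcond : (!((b :: r).getD 0 true) &&
          (decide ((0 : ℕ) = 0) && prev || decide ((0 : ℕ) ≠ 0) && (b :: r).getD (0 - 1) true))
        = (!b && prev) := by simp
    rw [hcond]
    cases hb : (!b && prev) with
    | false =>
      rw [if_neg (by simp [hb])]
      rw [hrest]
      simp [gapStarts, hb]
    | true =>
      rw [if_pos (by simp [hb])]
      rw [List.map_cons, hrest]
      simp [gapStarts, hb]


-- the ends comprehension computes gapEnds (generalized over the offset p)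
theorem ends_filter : ∀ (xs : List Bool) (p : Int),
    (((List.range xs.length).filter
        (fun i => !(xs.getD i true) &&
          (decide (i = xs.length - 1) || xs.getD (i + 1) true))).map
        (fun i : ℕ => p + (i : Int) + 1))
    = gapEnds xs p := by
  intro xs
  induction xs with
  | nil => intro p; simp [gapEnds]
  | cons b r ih =>
    intro p
    rw [List.length_cons, List.range_succ_eq_map, List.filter_cons]
    have hshift : List.filter (fun i => !((b :: r).getD i true) &&
          (decide (i = r.length + 1 - 1) || (b :: r).getD (i + 1) true))
          (List.map Nat.succ (List.range r.length))
        = List.map Nat.succ (List.filter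
          (fun j => !(r.getD j true) && (decide (j = r.length - 1) || r.getD (j + 1) true))
          (List.range r.length)) := by
      rw [List.filter_map]
      congr 1
      apply List.filter_congr
      intro j hj
      have hjlt : j < r.length := List.mem_range.mp hj
      simp only [Function.comp, Nat.succ_eq_add_one, List.getD_cons_succ]
      congr 2
      have : (j + 1 = r.length + 1 - 1) = (j = r.length - 1) :=
        propext ⟨fun h => by omega, fun h => by omega⟩
      simp only [this]
    have hmap : ((fun i : ℕ => p + (i : Int) + 1) ∘ Nat.succ)
        = (fun j : ℕ => (p + 1) + (j : Int) + 1) := by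
      funext j; simp [Function.comp, Nat.succ_eq_add_one]; ring
    have hrest : (List.map Nat.succ (List.filter
          (fun j => !(r.getD j true) && (decide (j = r.length - 1) || r.getD (j + 1) true))
          (List.range r.length))).map (fun i : ℕ => p + (i : Int) + 1)
        = gapEnds r (p + 1) := by
      rw [List.map_map, hmap, ih (p + 1)]
    have hcond : (!((b :: r).getD 0 true) &&
          (decide ((0 : ℕ) = r.length + 1 - 1) || (b :: r).getD (0 + 1) true))
        = (!b && r.head?.getD true) := by
      cases r with
      | nil => cases b <;> simp
      | cons c t => cases b <;> cases c <;> simp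
    simp only [hcond]
    cases hb : (!b && r.head?.getD true) with
    | false =>
      rw [if_neg (by simp [hb])]
      rw [hshift, hrest]
      simp [gapEnds, hb]
    | true =>
      rw [if_pos (by simp [hb])]
      rw [List.map_cons, hshift, hrest]
      simp [gapEnds, hb]


-- B's literal starts predicate agrees pointwise with the prev-generalized one at prev = true
theorem starts_pred_top (xs : List Bool) :
    (fun i => !(xs.getD i true) && (decide (i = 0) || xs.getD (i - 1) true))
    = (fun i => !(xs.getD i true) &&
        (decide (i = 0) && true || decide (i ≠ 0) && xs.getD (i - 1) true)) := by
  funext i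
  by_cases h : i = 0 <;> simp [h]

theorem altB (coverage : List Bool) :
    compute_gap_map_py_alt coverage = (gapStarts coverage true 0).zip (gapEnds coverage 0) := by
  unfold compute_gap_map_py_alt
  rw [starts_pred_top]
  rw [← starts_filter coverage true 0, ← ends_filter coverage 0]
  congr 1 <;> (apply List.map_congr_left; intro j _; simp)

-- ===== VERDICT (by name: the statement is the Claim_ definition above) =====
theorem compute_gap_map_py_spec : Claim_equal_compute_gap_map_py := by
  intro coverage _
  show compute_gap_map_py coverage = compute_gap_map_py_alt coverage
  unfold compute_gap_map_py
  rw [altB, ← (run_zip coverage 0).1]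
  have := lemA coverage 0 [] none
  simpa using this
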